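-- pv_equiv track=rewrite | github.com/jimregan/work-2026 | librivox-matching/librivox_matching/chunk_matcher.py | _words_to_char_span
-- ===== SOURCE A (Python) =====
-- def _words_to_char_span(text: str, words: list[str], start_idx: int, end_idx: int):
--     """Convert word indices back to character positions in the original text."""
--     pos = 0
--     char_start = None
--     char_end = None
--     for i, word in enumerate(words):
--         idx = text.find(word, pos)
--         if idx == -1:
--             idx = pos
--         if i == start_idx:
--             char_start = idx
--         if i == end_idx - 1:
--             char_end = idx + len(word)
--         pos = idx + len(word)
--     if char_start is None:
--         char_start = 0
--     if char_end is None: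
--         char_end = len(text)
--     return char_start, char_end
-- ===== SOURCE B (Python) =====
-- def _words_to_char_span(text: str, words: list[str], start_idx: int, end_idx: int):
--     """On-demand: compute each needed word's char bounds by a scan of only the
--     first k+1 words; words after the span are never examined."""
--     def word_bounds(k):
--         pos = 0
--         for w in words[:k + 1]:
--             idx = text.find(w, pos)
--             if idx == -1:
--                 idx = pos
--             pos = idx + len(w)
--         return pos - len(words[k]), pos
--
--     n = len(words)
--     char_start = word_bounds(start_idx)[0] if 0 <= start_idx < n else 0
--     char_end = word_bounds(end_idx - 1)[1] if 0 <= end_idx - 1 < n else len(text)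
--     return char_start, char_end
-- ===== Notes on version B (the rewrite author's own statement) =====
-- stated objective: alternative
-- what changed: Replaces the single full scan that conditionally captures char_start/char_end in-flight with on-demand lookups: a word_bounds(k) helper scans only the first k+1 words and is invoked at most twice, so words after the requested span are never examined (early termination) and the per-iteration index comparisons disappear.
import Mathlib
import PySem

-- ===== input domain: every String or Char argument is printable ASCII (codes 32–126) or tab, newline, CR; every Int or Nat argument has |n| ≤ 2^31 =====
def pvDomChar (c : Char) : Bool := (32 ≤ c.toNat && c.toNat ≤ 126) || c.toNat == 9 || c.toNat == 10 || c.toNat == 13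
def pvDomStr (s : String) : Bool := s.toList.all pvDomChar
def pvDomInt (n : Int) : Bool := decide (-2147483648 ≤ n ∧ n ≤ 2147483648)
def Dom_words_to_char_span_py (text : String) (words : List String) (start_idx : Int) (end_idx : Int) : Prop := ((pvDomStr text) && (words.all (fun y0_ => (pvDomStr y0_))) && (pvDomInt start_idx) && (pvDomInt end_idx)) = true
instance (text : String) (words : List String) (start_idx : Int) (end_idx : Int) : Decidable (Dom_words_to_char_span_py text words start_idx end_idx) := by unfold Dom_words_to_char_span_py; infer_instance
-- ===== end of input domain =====

-- B replaces A's single full scan with at most two on-demand prefix scans (word_bounds k),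
-- so words after the requested span are never examined (alternative decomposition).
-- ===== PORT A =====
def words_to_char_span_py_loop (text : String) (start_idx end_idx : Int) : List String → Nat → Int → Option Int → Option Int → Int × Option Int × Option Int
  | [], _, pos, cs, ce => (pos, cs, ce)
  | w :: ws, i, pos, cs, ce =>
    let idx0 := PySem.Str.findFrom text w pos none
    let idx := if idx0 = -1 then pos else idx0
    let cs' := if (i : Int) = start_idx then some idx else cs
    let ce' := if (i : Int) = end_idx - 1 then some (idx + PySem.Str.len w) else ce
    words_to_char_span_py_loop text start_idx end_idx ws (i + 1) (idx + PySem.Str.len w) cs' ce'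

def words_to_char_span_py (text : String) (words : List String) (start_idx : Int) (end_idx : Int) : Int × Int :=
  let st := words_to_char_span_py_loop text start_idx end_idx words 0 0 none none
  (st.2.1.getD 0, st.2.2.getD (PySem.Str.len text))

-- ===== PORT B =====
-- the inner 'for w in words[:k+1]' loop of word_bounds
def wtcs_scan (text : String) : List String → Int → Int
  | [], pos => pos
  | w :: ws, pos =>
    let idx0 := PySem.Str.findFrom text w pos none
    let idx := if idx0 = -1 then pos else idx0
    wtcs_scan text ws (idx + PySem.Str.len w)

def wtcs_word_bounds (text : String) (words : List String) (k : Nat) : Int × Int :=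
  let pos := wtcs_scan text (words.take (k + 1)) 0
  (pos - PySem.Str.len (words.getD k ""), pos)

def words_to_char_span_py_alt (text : String) (words : List String) (start_idx : Int) (end_idx : Int) : Int × Int :=
  let n : Int := words.length
  let char_start := if 0 ≤ start_idx ∧ start_idx < n then (wtcs_word_bounds text words start_idx.toNat).1 else 0
  let char_end := if 0 ≤ end_idx - 1 ∧ end_idx - 1 < n then (wtcs_word_bounds text words (end_idx - 1).toNat).2 else PySem.Str.len text
  (char_start, char_end)

-- ===== PRECONDITION & SPEC =====
def Spec_words_to_char_span_py (text : String) (words : List String) (start_idx : Int) (end_idx : Int) (out : Int × Int) : Prop := out = words_to_char_span_py_alt text words start_idx end_idx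
instance (text : String) (words : List String) (start_idx : Int) (end_idx : Int) (out : Int × Int) : Decidable (Spec_words_to_char_span_py text words start_idx end_idx out) := by unfold Spec_words_to_char_span_py; infer_instance

-- ===== CLAIM (what is proved, stated in full; the proofs are below) =====
def Claim_equal_words_to_char_span_py : Prop := ∀ (text : String) (words : List String) (start_idx : Int) (end_idx : Int), Dom_words_to_char_span_py text words start_idx end_idx → Spec_words_to_char_span_py text words start_idx end_idx (words_to_char_span_py text words start_idx end_idx)

-- ===== LEMMAS AND PROOFS =====

-- proof-side helper: the list of word start positions A's loop walks through
def wtcs_starts (text : String) : List String → Int → List Int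
  | [], _ => []
  | w :: ws, pos =>
    let idx0 := PySem.Str.findFrom text w pos none
    let idx := if idx0 = -1 then pos else idx0
    idx :: wtcs_starts text ws (idx + PySem.Str.len w)

theorem wtcs_loop_spec (text : String) (start_idx end_idx : Int) (ws : List String)
    (i : Nat) (pos : Int) (cs ce : Option Int) :
    (words_to_char_span_py_loop text start_idx end_idx ws i pos cs ce).2 =
      ((if (i : Int) ≤ start_idx ∧ start_idx < (i : Int) + ws.length then
          some ((wtcs_starts text ws pos).getD (start_idx - i).toNat 0) else cs),
       (if (i : Int) ≤ end_idx - 1 ∧ end_idx - 1 < (i : Int) + ws.length then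
          some ((wtcs_starts text ws pos).getD (end_idx - 1 - i).toNat 0
                + PySem.Str.len (ws.getD (end_idx - 1 - i).toNat "")) else ce)) := by
  induction ws generalizing i pos cs ce with
  | nil =>
    simp only [words_to_char_span_py_loop, wtcs_starts, List.length_nil]
    rw [if_neg (by push_cast; omega), if_neg (by push_cast; omega)]
  | cons w ws ih =>
    simp only [words_to_char_span_py_loop, wtcs_starts]
    rw [ih]
    refine Prod.ext ?_ ?_ <;> simp only [List.length_cons] <;> push_cast
    · by_cases hs : (i : Int) = start_idx
      · have h0 : (start_idx - (i : Int)).toNat = 0 := by omega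
        rw [h0]
        split_ifs <;> first | rfl | omega
      · by_cases h2 : (i : Int) ≤ start_idx ∧ start_idx < (i : Int) + ws.length + 1
        · have h3 : (start_idx - (i : Int)).toNat = (start_idx - ((i : Int) + 1)).toNat + 1 := by omega
          rw [h3]
          split_ifs <;> first | rfl | omega
        · split_ifs <;> first | rfl | omega
    · by_cases hs : (i : Int) = end_idx - 1
      · have h0 : (end_idx - 1 - (i : Int)).toNat = 0 := by omega
        rw [h0]
        split_ifs <;> first | rfl | omega
      · by_cases h2 : (i : Int) ≤ end_idx - 1 ∧ end_idx - 1 < (i : Int) + ws.length + 1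
        · have h3 : (end_idx - 1 - (i : Int)).toNat = (end_idx - 1 - ((i : Int) + 1)).toNat + 1 := by
            omega
          rw [h3]
          split_ifs <;> first | rfl | omega
        · split_ifs <;> first | rfl | omega

-- the prefix scan computes start-of-word-k plus its length
theorem wtcs_scan_take (text : String) (ws : List String) (k : Nat) (pos : Int)
    (hk : k < ws.length) :
    wtcs_scan text (ws.take (k + 1)) pos =
      (wtcs_starts text ws pos).getD k 0 + PySem.Str.len (ws.getD k "") := by
  induction ws generalizing k pos with
  | nil => simp at hk
  | cons w ws ih =>
    cases k with
    | zero => simp [wtcs_scan, wtcs_starts]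
    | succ k =>
      simp only [List.take_succ_cons, wtcs_scan, wtcs_starts]
      rw [ih _ _ (by simpa using hk)]
      rfl

-- ===== VERDICT (by name: the statement is the Claim_ definition above) =====
theorem words_to_char_span_py_spec : Claim_equal_words_to_char_span_py := by
  intro text words start_idx end_idx _
  show _ = _
  simp only [words_to_char_span_py, words_to_char_span_py_alt,
    wtcs_word_bounds]
  rw [wtcs_loop_spec]
  simp only [Nat.cast_zero, Prod.mk.injEq]
  constructor
  · by_cases h : 0 ≤ start_idx ∧ start_idx < (words.length : Int)
    · rw [if_pos (by omega), if_pos h, wtcs_scan_take text words start_idx.toNat 0 (by omega)]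
      simp
    · rw [if_neg (by omega), if_neg h]; simp
  · by_cases h : 0 ≤ end_idx - 1 ∧ end_idx - 1 < (words.length : Int)
    · rw [if_pos (by omega), if_pos h, wtcs_scan_take text words (end_idx - 1).toNat 0 (by omega)]
      simp
    · rw [if_neg (by omega), if_neg h]; simp
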